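-- pv_equiv track=rewrite | github.com/mattheww95/VCFViz | VCFViz/VCFToJson.py | apply_cigar_ops
-- ===== SOURCE A (Python) =====
-- def apply_cigar_ops(cigar, ref, alt, pos):
--     """
--     Cigar, reference then alterante
--     """
--
--     cigar_operations = {
--         "M": lambda *args: args[3][args[4]:args[4]+args[1]],
--         "X": lambda *args: args[3][args[4]:args[4]+args[1]],
--         "I": lambda *args: args[3][args[4]:args[4]+args[1]],
--         #"D": lambda *args: "-" * args[1]
--         "D": lambda *args: args[2][args[4]:args[4]+args[1]]
--     }
--
--     # args1 = cigar op, arg 2 = op length, arg3 ref_pos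
--     #TODO ref still not quite being chopped up right for insertions
--     position_ops = {
--         "M": lambda *args: int(args[1]), # no ref increase
--         "X": lambda *args: int(args[1]), # increase ref,
--         "I": lambda *args: 0, # no position increase
--         "D": lambda *args: int(args[1])
--     }
--     return_values = list()
--
--     new_alt = str()
--     running_pos = 0
--     ref_pos = int(pos)
--     ref_poses = list()
--     alt_slices = list()
--     ref_slices = list()
--     for i in cigar:
--         alt_slices.append(cigar_operations[i[0]](i[0], i[1], ref, alt, running_pos))
--         new_alt += alt_slices[-1]
--         ref_poses.append(ref_pos)
--         if i[0] not in {"I"}: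
--             ref_slices.append(ref[running_pos:running_pos + i[1]])
--             ref_pos += position_ops[i[0]](i[0], i[1], ref_pos)
--
--         if i[0] != "D":
--             # leave running position incremented for all but deletions as references string
--             running_pos += i[1]
--
--     data = list(zip(ref_poses, alt_slices, [i[0] for i in cigar], ref_slices))
--
--     variable_tag = {
--         "I": ("+", "INS"),
--         "X": ("", "SNP"),
--         "D": ("-", "DEL"),
--     }
--
--     for i in data:
--         if i[2] != "M":
--             return_values.append((i[0], f"{variable_tag[i[2]][0]}{i[1]}", variable_tag[i[2]][1], i[3]))
--     return return_values
-- ===== SOURCE B (Python) =====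
-- def apply_cigar_ops(cigar, ref, alt, pos):
--     """Declarative re-implementation: closed-form prefix sums instead of a stateful loop."""
--     ops = [o for o, _ in cigar]
--     lens = [l for _, l in cigar]
--     runs = [sum(l for o, l in cigar[:i] if o != "D") for i in range(len(cigar))]
--     rposs = [int(pos) + sum(int(l) for o, l in cigar[:i] if o != "I")
--              for i in range(len(cigar))]
--     alt_sl = [(ref if o == "D" else alt)[r:r + l]
--               for o, l, r in zip(ops, lens, runs)]
--     ref_sl = [ref[r:r + l] for o, l, r in zip(ops, lens, runs) if o != "I"]
--     tag = {"I": ("+", "INS"), "X": ("", "SNP"), "D": ("-", "DEL")}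
--     return [(p, tag[o][0] + a, tag[o][1], rs)
--             for p, a, o, rs in zip(rposs, alt_sl, ops, ref_sl) if o != "M"]
-- ===== Notes on version B (the rewrite author's own statement) =====
-- stated objective: alternative
-- what changed: Replaces A's single stateful loop (six mutable accumulators, lambda-dict dispatch) and the second filtering loop by a declarative pipeline: each per-op offset is a closed-form prefix sum over cigar[:i], the slice lists are comprehensions over zips, and the result is one filter+map comprehension.
import Mathlib
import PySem

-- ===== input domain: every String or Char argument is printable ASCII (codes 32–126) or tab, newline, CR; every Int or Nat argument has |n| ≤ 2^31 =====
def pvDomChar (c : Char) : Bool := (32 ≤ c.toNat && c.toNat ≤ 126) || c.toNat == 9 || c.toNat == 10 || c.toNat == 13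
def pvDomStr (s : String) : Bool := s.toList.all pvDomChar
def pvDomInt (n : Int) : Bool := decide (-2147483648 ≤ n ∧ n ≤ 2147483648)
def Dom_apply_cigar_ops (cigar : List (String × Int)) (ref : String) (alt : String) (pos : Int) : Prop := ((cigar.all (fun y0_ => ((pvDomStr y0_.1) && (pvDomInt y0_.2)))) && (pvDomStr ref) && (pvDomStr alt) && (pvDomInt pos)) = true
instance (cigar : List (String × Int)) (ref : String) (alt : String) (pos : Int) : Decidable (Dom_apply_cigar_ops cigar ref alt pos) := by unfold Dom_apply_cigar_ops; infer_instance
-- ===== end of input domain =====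

-- B replaces A's stateful loop + zip + filter pipeline by closed-form prefix sums and
-- declarative comprehensions (objective: alternative, same behaviour, no speed claim).

-- ===== PORT A =====
-- cigar_operations[op](op, len, ref, alt, running_pos); an unknown op raises KeyError in
-- Python (excluded by Pre_), so the final "" branch is never reached inside Pre_.
def pvA_cigarOp (op : String) (ln : Int) (ref alt : String) (run : Int) : String :=
  if op == "M" || op == "X" || op == "I" then PySem.Str.slice alt (some run) (some (run + ln))
  else if op == "D" then PySem.Str.slice ref (some run) (some (run + ln))
  else ""

-- position_ops[op](op, len, ref_pos); int(len) = len on an Int argument; the final 0 is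
-- the unreachable-inside-Pre_ KeyError branch (the lookup only happens for op ≠ "I").
def pvA_posOp (op : String) (ln : Int) : Int :=
  if op == "M" || op == "X" || op == "D" then ln else 0

-- variable_tag[op]; only looked up for op ≠ "M"; unknown op raises KeyError (outside Pre_).
def pvA_tag (op : String) : String × String :=
  if op == "I" then ("+", "INS")
  else if op == "X" then ("", "SNP")
  else if op == "D" then ("-", "DEL")
  else ("", "")

-- the first for-loop of A: state (new_alt, running_pos, ref_pos, ref_poses, alt_slices, ref_slices)
def pvA_loop (ref alt : String) :
    List (String × Int) → String → Int → Int → List Int → List String → List String →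
    (List Int × List String × List String)
  | [], _, _, _, rps, asl, rsl => (rps, asl, rsl)
  | (op, ln) :: rest, newAlt, run, rp, rps, asl, rsl =>
    pvA_loop ref alt rest
      (newAlt ++ pvA_cigarOp op ln ref alt run)
      (if op != "D" then run + ln else run)
      (if op != "I" then rp + pvA_posOp op ln else rp)
      (rps ++ [rp])
      (asl ++ [pvA_cigarOp op ln ref alt run])
      (if op != "I" then rsl ++ [PySem.Str.slice ref (some run) (some (run + ln))] else rsl)

-- data = list(zip(ref_poses, alt_slices, [i[0] for i in cigar], ref_slices))
def pvA_data (cigar : List (String × Int)) (st : List Int × List String × List String) :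
    List (Int × String × String × String) :=
  List.zip st.1 (List.zip st.2.1 (List.zip (cigar.map (·.1)) st.2.2))

-- the second for-loop of A (return_values accumulation)
def pvA_emit (data : List (Int × String × String × String)) : List (Int × String × String × String) :=
  data.foldl
    (fun acc i =>
      if i.2.2.1 != "M"
      then acc ++ [(i.1, (pvA_tag i.2.2.1).1 ++ i.2.1, (pvA_tag i.2.2.1).2, i.2.2.2)]
      else acc) []

def apply_cigar_ops (cigar : List (String × Int)) (ref : String) (alt : String) (pos : Int) : List (Int × String × String × String) :=
  pvA_emit (pvA_data cigar (pvA_loop ref alt cigar "" 0 pos [] [] []))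

-- ===== PORT B =====
-- tag[o] of the final comprehension; unknown op raises KeyError in Python (outside Pre_).
def pvB_tag (op : String) : String × String :=
  if op == "I" then ("+", "INS")
  else if op == "X" then ("", "SNP")
  else if op == "D" then ("-", "DEL")
  else ("", "")

-- runs = [sum(l for o, l in cigar[:i] if o != "D") for i in range(len(cigar))]
def pvB_runs (cigar : List (String × Int)) : List Int :=
  (List.range cigar.length).map
    (fun i => (((cigar.take i).filter (fun p => p.1 != "D")).map (·.2)).sum)

-- rposs = [int(pos) + sum(int(l) for o, l in cigar[:i] if o != "I") for i in range(len(cigar))]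
def pvB_rposs (cigar : List (String × Int)) (pos : Int) : List Int :=
  (List.range cigar.length).map
    (fun i => pos + (((cigar.take i).filter (fun p => p.1 != "I")).map (·.2)).sum)

-- alt_sl = [(ref if o == "D" else alt)[r:r+l] for o, l, r in zip(ops, lens, runs)]
def pvB_altSl (cigar : List (String × Int)) (ref alt : String) : List String :=
  (List.zip (cigar.map (·.1)) (List.zip (cigar.map (·.2)) (pvB_runs cigar))).map
    (fun x => PySem.Str.slice (if x.1 == "D" then ref else alt) (some x.2.2) (some (x.2.2 + x.2.1)))

-- ref_sl = [ref[r:r+l] for o, l, r in zip(ops, lens, runs) if o != "I"]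
def pvB_refSl (cigar : List (String × Int)) (ref : String) : List String :=
  ((List.zip (cigar.map (·.1)) (List.zip (cigar.map (·.2)) (pvB_runs cigar))).filter
      (fun x => x.1 != "I")).map
    (fun x => PySem.Str.slice ref (some x.2.2) (some (x.2.2 + x.2.1)))

def apply_cigar_ops_alt (cigar : List (String × Int)) (ref : String) (alt : String) (pos : Int) : List (Int × String × String × String) :=
  ((List.zip (pvB_rposs cigar pos)
      (List.zip (pvB_altSl cigar ref alt) (List.zip (cigar.map (·.1)) (pvB_refSl cigar ref)))).filter
      (fun x => x.2.2.1 != "M")).map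
    (fun x => (x.1, (pvB_tag x.2.2.1).1 ++ x.2.1, (pvB_tag x.2.2.1).2, x.2.2.2))

-- ===== PRECONDITION & SPEC =====
-- Pre_ excludes cigars containing an operation outside {"M","X","I","D"}: on those A
-- raises KeyError (cigar_operations[i[0]]) and returns nothing.
def Pre_apply_cigar_ops (cigar : List (String × Int)) (ref : String) (alt : String) (pos : Int) : Prop :=
  (cigar.all (fun p => p.1 == "M" || p.1 == "X" || p.1 == "I" || p.1 == "D")) = true
instance (cigar : List (String × Int)) (ref : String) (alt : String) (pos : Int) : Decidable (Pre_apply_cigar_ops cigar ref alt pos) := by unfold Pre_apply_cigar_ops; infer_instance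

def pvWitness_apply_cigar_ops : (List (String × Int)) × String × String × Int :=
  ([("M", 2), ("X", 1), ("I", 2), ("D", 1)], "ACGTAC", "ACTTTGG", 10)

def Spec_apply_cigar_ops (cigar : List (String × Int)) (ref : String) (alt : String) (pos : Int) (out : List (Int × String × String × String)) : Prop := out = apply_cigar_ops_alt cigar ref alt pos
instance (cigar : List (String × Int)) (ref : String) (alt : String) (pos : Int) (out : List (Int × String × String × String)) : Decidable (Spec_apply_cigar_ops cigar ref alt pos out) := by unfold Spec_apply_cigar_ops; infer_instance

-- ===== CLAIM (what is proved, stated in full; the proofs are below) =====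
def Claim_equal_apply_cigar_ops : Prop := ∀ (cigar : List (String × Int)) (ref : String) (alt : String) (pos : Int), Dom_apply_cigar_ops cigar ref alt pos → Pre_apply_cigar_ops cigar ref alt pos → Spec_apply_cigar_ops cigar ref alt pos (apply_cigar_ops cigar ref alt pos)

-- ===== LEMMAS AND PROOFS =====

-- recursive characterisations of the three lists both versions build
def pvSpecR : List (String × Int) → Int → List Int
  | [], _ => []
  | (op, ln) :: t, rp => rp :: pvSpecR t (rp + (if op != "I" then ln else 0))

def pvSpecA (ref alt : String) : List (String × Int) → Int → List String
  | [], _ => []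
  | (op, ln) :: t, run =>
    PySem.Str.slice (if op == "D" then ref else alt) (some run) (some (run + ln)) ::
      pvSpecA ref alt t (run + (if op != "D" then ln else 0))

def pvSpecS (ref : String) : List (String × Int) → Int → List String
  | [], _ => []
  | (op, ln) :: t, run =>
    (if op != "I" then [PySem.Str.slice ref (some run) (some (run + ln))] else []) ++
      pvSpecS ref t (run + (if op != "D" then ln else 0))

lemma pvA_loop_spec (ref alt : String) (c : List (String × Int))
    (h : (c.all (fun p => p.1 == "M" || p.1 == "X" || p.1 == "I" || p.1 == "D")) = true) :
    ∀ (na : String) (run rp : Int) (rps : List Int) (asl rsl : List String),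
      pvA_loop ref alt c na run rp rps asl rsl =
        (rps ++ pvSpecR c rp, asl ++ pvSpecA ref alt c run, rsl ++ pvSpecS ref c run) := by
  induction c with
  | nil => intro na run rp rps asl rsl; simp [pvA_loop, pvSpecR, pvSpecA, pvSpecS]
  | cons hd t ih =>
    obtain ⟨op, ln⟩ := hd
    simp only [List.all_cons, Bool.and_eq_true] at h
    intro na run rp rps asl rsl
    have hv := h.1
    have ht := ih h.2
    rcases Bool.or_eq_true_iff.mp hv with hv' | hD
    · rcases Bool.or_eq_true_iff.mp hv' with hv'' | hI
      · rcases Bool.or_eq_true_iff.mp hv'' with hM | hX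
        · have : op = "M" := by simpa using hM
          subst this
          simp [pvA_loop, pvSpecR, pvSpecA, pvSpecS, pvA_cigarOp, pvA_posOp, ht]
        · have : op = "X" := by simpa using hX
          subst this
          simp [pvA_loop, pvSpecR, pvSpecA, pvSpecS, pvA_cigarOp, pvA_posOp, ht]
      · have : op = "I" := by simpa using hI
        subst this
        simp [pvA_loop, pvSpecR, pvSpecA, pvSpecS, pvA_cigarOp, ht]
    · have : op = "D" := by simpa using hD
      subst this
      simp [pvA_loop, pvSpecR, pvSpecA, pvSpecS, pvA_cigarOp, pvA_posOp, ht]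

-- one-step unfolding of the prefix-sum comprehensions of B
lemma pvRuns_cons (op : String) (ln : Int) (t : List (String × Int)) (base : Int)
    (pred : String × Int → Bool) :
    (List.range (t.length + 1)).map
        (fun i => base + (((((op, ln) :: t).take i).filter pred).map (·.2)).sum) =
      base :: (List.range t.length).map
        (fun i => (base + (if pred (op, ln) then ln else 0)) + (((t.take i).filter pred).map (·.2)).sum) := by
  rw [List.range_succ_eq_map]
  simp only [List.map_cons, List.map_map]
  congr 1
  · simp
  · apply List.map_congr_left
    intro i _
    simp only [Function.comp_apply, Nat.succ_eq_add_one, List.take_succ_cons, List.filter_cons]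
    by_cases hp : pred (op, ln) = true <;> simp [hp, Int.add_assoc]

lemma pvRposs_eq (c : List (String × Int)) : ∀ rp : Int,
    (List.range c.length).map
        (fun i => rp + (((c.take i).filter (fun p => p.1 != "I")).map (·.2)).sum) =
      pvSpecR c rp := by
  induction c with
  | nil => intro rp; simp [pvSpecR]
  | cons hd t ih =>
    obtain ⟨op, ln⟩ := hd
    intro rp
    rw [List.length_cons, pvRuns_cons op ln t rp (fun p => p.1 != "I")]
    simp only [pvSpecR]
    congr 1
    exact ih _

lemma pvAltSl_eq (ref alt : String) (c : List (String × Int)) : ∀ run : Int,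
    ((c.map (·.1)).zip ((c.map (·.2)).zip
        ((List.range c.length).map
          (fun i => run + (((c.take i).filter (fun p => p.1 != "D")).map (·.2)).sum)))).map
      (fun x => PySem.Str.slice (if x.1 == "D" then ref else alt) (some x.2.2) (some (x.2.2 + x.2.1))) =
    pvSpecA ref alt c run := by
  induction c with
  | nil => intro run; simp [pvSpecA]
  | cons hd t ih =>
    obtain ⟨op, ln⟩ := hd
    intro run
    rw [List.length_cons, pvRuns_cons op ln t run (fun p => p.1 != "D")]
    simp only [List.map_cons, List.zip_cons_cons, pvSpecA]
    congr 1
    exact ih _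

lemma pvRefSl_eq (ref : String) (c : List (String × Int)) : ∀ run : Int,
    (((c.map (·.1)).zip ((c.map (·.2)).zip
        ((List.range c.length).map
          (fun i => run + (((c.take i).filter (fun p => p.1 != "D")).map (·.2)).sum)))).filter
        (fun x => x.1 != "I")).map
      (fun x => PySem.Str.slice ref (some x.2.2) (some (x.2.2 + x.2.1))) =
    pvSpecS ref c run := by
  induction c with
  | nil => intro run; simp [pvSpecS]
  | cons hd t ih =>
    obtain ⟨op, ln⟩ := hd
    intro run
    rw [List.length_cons, pvRuns_cons op ln t run (fun p => p.1 != "D")]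
    simp only [List.map_cons, List.zip_cons_cons, List.filter_cons, pvSpecS]
    by_cases hI : op = "I"
    · subst hI
      simp only [show (("I", ln).1 != "I") = false from rfl, Bool.false_eq_true, if_false,
        List.nil_append]
      exact ih _
    · have hI' : (((op, ln).1 != "I")) = true := by simpa using hI
      simp only [hI', if_true, List.map_cons, List.singleton_append]
      congr 1
      exact ih _

-- B's runs start at 0; bring them to the `base +` form the lemmas above use
lemma pvZeroBase (c : List (String × Int)) (pred : String × Int → Bool) :
    (List.range c.length).map (fun i => (((c.take i).filter pred).map (·.2)).sum) =
      (List.range c.length).map (fun i => (0 : Int) + (((c.take i).filter pred).map (·.2)).sum) := by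
  simp

-- ===== VERDICT (by name: the statement is the Claim_ definition above) =====
theorem apply_cigar_ops_spec : Claim_equal_apply_cigar_ops := by
  intro cigar ref alt pos _ hPre
  unfold Spec_apply_cigar_ops
  simp only [apply_cigar_ops, apply_cigar_ops_alt, pvA_data, pvA_emit,
    pvB_rposs, pvB_altSl, pvB_refSl, pvB_runs]
  rw [pvA_loop_spec ref alt cigar hPre "" 0 pos [] [] []]
  rw [pvZeroBase cigar (fun p => p.1 != "D")]
  rw [pvAltSl_eq ref alt cigar 0, pvRefSl_eq ref cigar 0, pvRposs_eq cigar pos]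
  simp only [List.nil_append]
  rw [PySem.List.foldl_append_if
    (fun (i : Int × String × String × String) => i.2.2.1 != "M")
    (fun (i : Int × String × String × String) =>
      (i.1, (pvA_tag i.2.2.1).1 ++ i.2.1, (pvA_tag i.2.2.1).2, i.2.2.2))]
  simp only [List.nil_append]
  rfl
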